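-- pv_equiv track=rewrite | github.com/harshasatyakumar1509/ContourFeatures | concave_corner.py | create_tree
-- ===== SOURCE A (Python) =====
-- def create_tree(hierarchy):
--     ''' Creates high lever tree structure in a dictionary '''
--     tree ={}
--     for e, h in enumerate(hierarchy[0]):
--         try:
--             tree[h[3]].append(e)
--         except:
--             tree[h[3]]=[e]
--     return tree
-- ===== SOURCE B (Python) =====
-- def create_tree(hierarchy):
--     ''' Creates high lever tree structure in a dictionary '''
--     rows = hierarchy[0]
--     parents = list(dict.fromkeys(h[3] for h in rows))
--     return {p: [e for e, h in enumerate(rows) if h[3] == p] for p in parents}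
-- ===== Notes on version B (the rewrite author's own statement) =====
-- stated objective: alternative
-- what changed: Replaces the single-pass try/except dict accumulation by a two-phase decomposition: first collect the distinct parent keys in first-occurrence order with dict.fromkeys, then build each group by a comprehension scan over the enumerated rows.
import Mathlib
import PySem

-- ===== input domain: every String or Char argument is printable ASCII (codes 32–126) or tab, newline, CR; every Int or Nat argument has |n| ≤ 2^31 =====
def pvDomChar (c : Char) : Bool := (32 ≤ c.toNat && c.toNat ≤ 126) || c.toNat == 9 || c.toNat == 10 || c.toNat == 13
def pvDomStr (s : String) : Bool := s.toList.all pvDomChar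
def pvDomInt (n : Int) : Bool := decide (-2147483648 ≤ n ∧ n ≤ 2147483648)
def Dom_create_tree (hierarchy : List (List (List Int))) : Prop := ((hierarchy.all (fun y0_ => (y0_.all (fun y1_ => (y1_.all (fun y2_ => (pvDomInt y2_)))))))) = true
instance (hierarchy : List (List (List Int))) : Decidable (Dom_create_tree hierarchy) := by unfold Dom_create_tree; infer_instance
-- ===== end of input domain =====

-- B replaces A's single-pass try/except dict accumulation with a two-phase decomposition
-- (distinct parent keys in first-occurrence order, then one gathering scan per key); same cost class, no speed claim.


-- ===== PORT A =====
-- 'tree[h[3]].append(e)' with bare 'except: tree[h[3]] = [e]' is exactly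
-- 'tree[h[3]] = tree.get(h[3], []) + [e]', i.e. Dict.modify with default [].
-- hierarchy[0] and h[3] are in range on every input Pre_ admits (the .getD defaults are never reached there).
def create_tree (hierarchy : List (List (List Int))) : List (Int × List Int) :=
  let rows := (PySem.List.pyGet? hierarchy 0).getD []
  ((PySem.List.enumerate rows).foldl
      (fun tree x => tree.modify ((PySem.List.pyGet? x.2 3).getD 0) [] (fun l => l ++ [x.1]))
      PySem.Dict.empty).items

-- ===== PORT B =====
def create_tree_alt (hierarchy : List (List (List Int))) : List (Int × List Int) :=
  let rows := (PySem.List.pyGet? hierarchy 0).getD []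
  let parents := PySem.List.dedup (rows.map (fun h => (PySem.List.pyGet? h 3).getD 0))
  parents.map (fun p => (p,
    ((PySem.List.enumerate rows).filter
        (fun x => (PySem.List.pyGet? x.2 3).getD 0 == p)).map (·.1)))

-- ===== PRECONDITION & SPEC =====
-- Python A raises IndexError when hierarchy is empty (hierarchy[0]) or when some row of
-- hierarchy[0] has fewer than 4 entries (h[3] raises again inside the bare except); Pre_ excludes exactly those.
def Pre_create_tree (hierarchy : List (List (List Int))) : Prop :=
  hierarchy ≠ [] ∧ ∀ h ∈ hierarchy.headI, 4 ≤ h.length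
instance (hierarchy : List (List (List Int))) : Decidable (Pre_create_tree hierarchy) := by unfold Pre_create_tree; infer_instance

def pvWitness_create_tree : List (List (List Int)) := [[[0, 0, 0, 5], [0, 0, 0, 2], [0, 0, 0, 5]]]

def Spec_create_tree (hierarchy : List (List (List Int))) (out : List (Int × List Int)) : Prop := out = create_tree_alt hierarchy
instance (hierarchy : List (List (List Int))) (out : List (Int × List Int)) : Decidable (Spec_create_tree hierarchy out) := by unfold Spec_create_tree; infer_instance

-- ===== CLAIM (what is proved, stated in full; the proofs are below) =====
def Claim_equal_create_tree : Prop := ∀ (hierarchy : List (List (List Int))), Dom_create_tree hierarchy → Pre_create_tree hierarchy → Spec_create_tree hierarchy (create_tree hierarchy)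

-- ===== LEMMAS AND PROOFS =====

theorem map_key_enumerate {f : List Int → Int} (rows : List (List Int)) (s : Int) :
    (PySem.List.enumerate rows s).map (fun x => f x.2) = rows.map f := by
  induction rows generalizing s with
  | nil => simp [PySem.List.enumerate_nil]
  | cons r t ih => simp [PySem.List.enumerate_cons, ih]

theorem create_tree_core (rows : List (List Int)) :
    ((PySem.List.enumerate rows).foldl
        (fun tree x => tree.modify ((PySem.List.pyGet? x.2 3).getD 0) [] (fun l => l ++ [x.1]))
        PySem.Dict.empty).items
    = (PySem.List.dedup (rows.map (fun h => (PySem.List.pyGet? h 3).getD 0))).map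
        (fun p => (p,
          ((PySem.List.enumerate rows).filter
              (fun x => (PySem.List.pyGet? x.2 3).getD 0 == p)).map (·.1))) := by
  set l := PySem.List.enumerate rows with hl
  set key : Int × List Int → Int := fun x => (PySem.List.pyGet? x.2 3).getD 0 with hkey
  have hnd : ((l.foldl (fun tree x => tree.modify (key x) [] (fun v => v ++ [x.1])) PySem.Dict.empty)).keys.Nodup :=
    PySem.Dict.nodup_keys_foldl_modify_key l key [] (fun _ x => (fun v => v ++ [x.1])) PySem.Dict.empty (by simp)
  rw [PySem.Dict.items_eq_map_keys _ hnd []]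
  have hkeys : ((l.foldl (fun tree x => tree.modify (key x) [] (fun v => v ++ [x.1])) PySem.Dict.empty)).keys
      = PySem.List.dedup (rows.map (fun h => (PySem.List.pyGet? h 3).getD 0)) := by
    rw [PySem.Dict.keys_foldl_modify_key]
    have hm : l.map key = rows.map (fun h => (PySem.List.pyGet? h 3).getD 0) := by
      rw [hl, hkey]; exact map_key_enumerate (f := fun h => (PySem.List.pyGet? h 3).getD 0) rows 0
    rw [hm]
    simp [PySem.Set.update_nil_left]
  rw [hkeys]
  apply List.map_congr_left
  intro p hp
  congr 1
  have : (l.foldl (fun tree x => tree.modify (key x) [] (fun v => v ++ [x.1])) PySem.Dict.empty)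
      = ((l.map (fun x => (key x, x.1))).foldl (fun d q => d.modify q.1 [] (fun v => v ++ [q.2])) PySem.Dict.empty) := by
    rw [List.foldl_map]
  rw [this, PySem.Dict.getD_foldl_modify_append]
  simp only [List.filter_map, Function.comp_def, List.map_map]
  simp [hkey]

theorem create_tree_spec : Claim_equal_create_tree := by
  intro hierarchy _ _
  show create_tree hierarchy = create_tree_alt hierarchy
  simp only [create_tree, create_tree_alt]
  exact create_tree_core _
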